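-- pv_equiv track=rewrite | github.com/Lorena-Davila/lorena-davila-examenes | Práctica 02/ejercicio_02.py | normalizar_nombres
-- ===== SOURCE A (Python) =====
-- def normalizar_nombres(nombres):
--     lista_final = []
--     nombres_vistos = set()
--
--     for texto in nombres:
--         nombre_formateado = texto.strip()
--         nombre_formateado = nombre_formateado.title()
--         lista_nombres = nombre_formateado.split()
--
--         for nombre in lista_nombres:
--             if nombre not in nombres_vistos:
--                 lista_final.append(nombre)
--                 nombres_vistos.add(nombre)
--
--     return lista_final
-- ===== SOURCE B (Python) =====
-- def normalizar_nombres(nombres):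
--     tokens = []
--     for texto in nombres:
--         tokens += texto.strip().title().split()
--     result = []
--     rest = tokens
--     while rest:
--         head = rest[0]
--         result.append(head)
--         tail = rest[1:]
--         rest = [w for w in tail if w != head] if head in tail else tail
--     return result
-- ===== Notes on version B (the rewrite author's own statement) =====
-- stated objective: alternative
-- what changed: Replaces A's single fused pass with a seen-set and membership branch by a flatten phase plus a worklist loop that emits the head token and deletes all of its later occurrences from the remaining worklist (no seen-set is ever kept).
import Mathlib
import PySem

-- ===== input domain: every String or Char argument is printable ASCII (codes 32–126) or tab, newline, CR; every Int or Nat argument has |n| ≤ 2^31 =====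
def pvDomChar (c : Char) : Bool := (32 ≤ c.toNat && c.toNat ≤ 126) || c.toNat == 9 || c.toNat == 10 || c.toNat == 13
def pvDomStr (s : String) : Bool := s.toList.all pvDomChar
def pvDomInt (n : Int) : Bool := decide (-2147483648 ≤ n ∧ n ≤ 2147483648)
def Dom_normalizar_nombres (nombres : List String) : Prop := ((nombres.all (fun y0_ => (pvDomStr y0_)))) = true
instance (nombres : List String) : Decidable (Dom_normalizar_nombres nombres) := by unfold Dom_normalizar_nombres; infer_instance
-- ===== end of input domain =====

-- B replaces A's fused seen-set pass by a flatten phase plus a worklist loop that emits the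
-- head token and deletes all its later occurrences from the worklist (no seen-set).

-- ===== PORT A =====
-- hand port of str.title (PySem has none); exact on the ASCII domain, where cased = letter
def pyTitleAux : List Char → Bool → List Char
  | [], _ => []
  | c :: r, prev =>
    if c.isAlpha then (if prev then c.toLower else c.toUpper) :: pyTitleAux r true
    else c :: pyTitleAux r false

def pyTitle (s : String) : String := String.ofList (pyTitleAux s.toList false)

def normalizar_nombres (nombres : List String) : List String :=
  (nombres.foldl
    (fun (st : List String × PySem.Set String) texto =>
      let nombre_formateado := PySem.Str.strip texto
      let nombre_formateado := pyTitle nombre_formateado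
      let lista_nombres := PySem.Str.split₀ nombre_formateado
      lista_nombres.foldl
        (fun st nombre =>
          if !(PySem.Set.contains st.2 nombre) then
            (st.1 ++ [nombre], PySem.Set.add st.2 nombre)
          else st)
        st)
    ([], PySem.Set.empty)).1

-- ===== PORT B =====
-- Source B's while-loop over the worklist 'rest' with the accumulator 'result'
def pvLoop : List String → List String → List String
  | [], result => result
  | head :: tail, result =>
    pvLoop (if head ∈ tail then tail.filter (· != head) else tail) (result ++ [head])
termination_by rest _ => rest.length
decreasing_by
  split
  · simpa using Nat.lt_succ_of_le (List.length_filter_le _ tail)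
  · simp

def normalizar_nombres_alt (nombres : List String) : List String :=
  pvLoop
    (nombres.foldl (fun tokens texto =>
      tokens ++ PySem.Str.split₀ (pyTitle (PySem.Str.strip texto))) [])
    []

-- ===== PRECONDITION & SPEC =====
def Spec_normalizar_nombres (nombres : List String) (out : List String) : Prop := out = normalizar_nombres_alt nombres
instance (nombres : List String) (out : List String) : Decidable (Spec_normalizar_nombres nombres out) := by unfold Spec_normalizar_nombres; infer_instance

-- ===== CLAIM (what is proved, stated in full; the proofs are below) =====
def Claim_equal_normalizar_nombres : Prop := ∀ (nombres : List String), Dom_normalizar_nombres nombres → Spec_normalizar_nombres nombres (normalizar_nombres nombres)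

-- ===== LEMMAS AND PROOFS =====

-- A's inner step, named for the lemmas below
def pvStep (st : List String × PySem.Set String) (nombre : String) :
    List String × PySem.Set String :=
  if !(PySem.Set.contains st.2 nombre) then
    (st.1 ++ [nombre], PySem.Set.add st.2 nombre)
  else st

-- the fused state stays of the form (l, l); folding tokens is Set.update
theorem pvStep_foldl (xs : List String) : ∀ (l : List String),
    xs.foldl pvStep (l, l) = (PySem.Set.update l xs, PySem.Set.update l xs) := by
  induction xs with
  | nil => intro l; simp [PySem.Set.update]
  | cons x t ih =>
    intro l
    rw [List.foldl_cons]
    by_cases h : x ∈ l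
    · have h1 : pvStep (l, l) x = (l, l) := by simp [pvStep, PySem.Set.contains, h]
      have h2 : PySem.Set.update l (x :: t) = PySem.Set.update l t := by
        simp [PySem.Set.update, PySem.Set.add, h]
      rw [h1, h2, ih l]
    · have h1 : pvStep (l, l) x = (l ++ [x], l ++ [x]) := by
        simp [pvStep, PySem.Set.contains, h, PySem.Set.add]
      have h2 : PySem.Set.update l (x :: t) = PySem.Set.update (l ++ [x]) t := by
        simp [PySem.Set.update, PySem.Set.add, h]
      rw [h1, h2, ih (l ++ [x])]

-- the nested fold over the strings is the fold over the flattened token list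
theorem pvFoldl_flat (nombres : List String) (st : List String × PySem.Set String) :
    nombres.foldl
      (fun st texto =>
        (PySem.Str.split₀ (pyTitle (PySem.Str.strip texto))).foldl pvStep st) st
    = (nombres.foldl (fun tokens texto =>
        tokens ++ PySem.Str.split₀ (pyTitle (PySem.Str.strip texto))) []).foldl pvStep st := by
  rw [PySem.List.foldl_append_eq_flatMap]
  induction nombres generalizing st with
  | nil => simp
  | cons x t ih =>
    simp only [List.foldl_cons, List.flatMap_cons, List.nil_append, List.foldl_append, ih]

-- the worklist step always filters: when head ∉ tail the filter is the identity
theorem pvLoop_cons (head : String) (tail result : List String) :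
    pvLoop (head :: tail) result = pvLoop (tail.filter (· != head)) (result ++ [head]) := by
  rw [pvLoop]
  by_cases h : head ∈ tail
  · simp [h]
  · have : tail.filter (· != head) = tail :=
      List.filter_eq_self.mpr (fun y hy => by
        simp only [bne_iff_ne, ne_eq]
        exact fun e => h (e ▸ hy))
    simp [h, this]

-- Set.update (A's first-occurrence accumulation) coincides with B's worklist loop
theorem pvUpdate_eq_loop (xs : List String) : ∀ (acc : List String),
    PySem.Set.update acc xs = pvLoop (xs.filter (fun y => !(y ∈ acc : Bool))) acc := by
  induction xs with
  | nil => intro acc; simp [PySem.Set.update, pvLoop]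
  | cons x t ih =>
    intro acc
    by_cases h : x ∈ acc
    · have h2 : PySem.Set.update acc (x :: t) = PySem.Set.update acc t := by
        simp [PySem.Set.update, PySem.Set.add, h]
      have h3 : (x :: t).filter (fun y => !(y ∈ acc : Bool))
          = t.filter (fun y => !(y ∈ acc : Bool)) := by simp [h]
      rw [h2, h3, ih]
    · have h2 : PySem.Set.update acc (x :: t) = PySem.Set.update (acc ++ [x]) t := by
        simp [PySem.Set.update, PySem.Set.add, h]
      have h3 : (x :: t).filter (fun y => !(y ∈ acc : Bool))
          = x :: t.filter (fun y => !(y ∈ acc : Bool)) := by simp [h]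
      have h4 : (t.filter (fun y => !(y ∈ acc : Bool))).filter (· != x)
          = t.filter (fun y => !(y ∈ acc ++ [x] : Bool)) := by
        rw [List.filter_filter]
        apply List.filter_congr
        intro y _
        by_cases hy : y = x <;> by_cases hya : y ∈ acc <;> simp [hy, hya]
      rw [h2, ih, h3, pvLoop_cons, h4]

theorem normalizar_nombres_spec : Claim_equal_normalizar_nombres := by
  intro nombres _
  show normalizar_nombres nombres = normalizar_nombres_alt nombres
  unfold normalizar_nombres normalizar_nombres_alt
  have h1 : (fun (st : List String × PySem.Set String) texto =>
      (PySem.Str.split₀ (pyTitle (PySem.Str.strip texto))).foldl pvStep st)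
      = (fun (st : List String × PySem.Set String) texto =>
      let nombre_formateado := PySem.Str.strip texto
      let nombre_formateado := pyTitle nombre_formateado
      let lista_nombres := PySem.Str.split₀ nombre_formateado
      lista_nombres.foldl
        (fun st nombre =>
          if !(PySem.Set.contains st.2 nombre) then
            (st.1 ++ [nombre], PySem.Set.add st.2 nombre)
          else st) st) := rfl
  rw [← h1, pvFoldl_flat, PySem.List.foldl_append_eq_flatMap]
  simp only [List.nil_append]
  have h2 : (([], PySem.Set.empty) : List String × PySem.Set String) = (([], []) : List String × List String) := rfl
  rw [h2, pvStep_foldl, pvUpdate_eq_loop]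
  have h3 : ((nombres.flatMap fun texto => PySem.Str.split₀ (pyTitle (PySem.Str.strip texto))).filter
      (fun y => !(y ∈ ([] : List String) : Bool))) = nombres.flatMap fun texto =>
        PySem.Str.split₀ (pyTitle (PySem.Str.strip texto)) :=
    List.filter_eq_self.mpr (by simp)
  rw [h3]
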